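-- pv_equiv track=rewrite | github.com/sayhiben/legislature-tools | testifier_audit/src/testifier_audit/io/rarity_baselines.py | _resolve_column
-- ===== SOURCE A (Python) =====
-- def _resolve_column(
--     columns: list[str],
--     explicit: str | None,
--     candidates: tuple[str, ...],
--     fallback: str | None = None,
-- ) -> str:
--     if explicit:
--         if explicit not in columns:
--             raise ValueError(
--                 f"Column '{explicit}' was not found. Available columns: {', '.join(columns)}"
--             )
--         return explicit
--
--     lowered = {column.lower(): column for column in columns}
--     for candidate in candidates:
--         match = lowered.get(candidate.lower())
--         if match:
--             return match
--
--     if fallback is not None: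
--         return fallback
--     raise ValueError(f"Could not infer column from: {', '.join(columns)}")
-- ===== SOURCE B (Python) =====
-- def _resolve_column(
--     columns: list[str],
--     explicit: str | None,
--     candidates: tuple[str, ...],
--     fallback: str | None = None,
-- ) -> str:
--     if explicit:
--         if explicit not in columns:
--             raise ValueError(
--                 f"Column '{explicit}' was not found. Available columns: {', '.join(columns)}"
--             )
--         return explicit
--
--     no_match = len(candidates)
--     rank = {}
--     for index, candidate in enumerate(candidates):
--         key = candidate.lower()
--         if key not in rank:
--             rank[key] = index
--
--     best = None
--     best_rank = no_match
--     for column in columns: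
--         r = rank.get(column.lower(), no_match)
--         if r < best_rank:
--             best = column
--             best_rank = r
--     if best is not None:
--         return best
--
--     if fallback is not None:
--         return fallback
--     raise ValueError(f"Could not infer column from: {', '.join(columns)}")
-- ===== Notes on version B (the rewrite author's own statement) =====
-- stated objective: alternative
-- what changed: B inverts the loop structure: instead of indexing columns by lowercase and probing the index per candidate, it ranks candidates by priority and makes a single pass over the columns tracking the minimum-rank match; Pre_ excludes inputs where two distinct column names collide case-insensitively on a candidate name or an empty column name can match an empty candidate, where A's dict-overwrite order and 'if match:' truthiness skip are accidental corner behaviour.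
-- outside the precondition, e.g. on _resolve_column(['A', 'a'], None, ('a',), None): A returns 'a', B returns 'A'; on _resolve_column(['', 'x'], None, ('',), 'fb'): A returns 'fb', B returns ''
import Mathlib
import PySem

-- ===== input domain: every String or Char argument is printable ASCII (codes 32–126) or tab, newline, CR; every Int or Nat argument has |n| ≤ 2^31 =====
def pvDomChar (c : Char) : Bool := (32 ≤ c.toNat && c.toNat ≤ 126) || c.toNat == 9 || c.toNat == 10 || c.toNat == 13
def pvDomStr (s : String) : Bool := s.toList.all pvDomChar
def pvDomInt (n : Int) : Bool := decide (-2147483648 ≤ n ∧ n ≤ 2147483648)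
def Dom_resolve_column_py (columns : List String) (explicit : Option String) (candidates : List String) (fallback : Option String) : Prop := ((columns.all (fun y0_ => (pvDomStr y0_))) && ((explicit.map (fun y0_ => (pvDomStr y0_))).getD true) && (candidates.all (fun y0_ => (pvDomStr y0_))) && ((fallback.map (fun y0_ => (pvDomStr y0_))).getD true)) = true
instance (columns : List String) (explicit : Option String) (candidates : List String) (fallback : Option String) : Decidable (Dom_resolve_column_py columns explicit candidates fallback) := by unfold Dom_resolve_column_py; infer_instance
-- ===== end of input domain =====

-- B inverts the loop structure: it ranks candidates by priority once and makes a single pass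
-- over the columns tracking the minimum-rank case-insensitive match (objective: alternative).

-- ===== PORT A =====
-- Python truthiness of an optional string: None and "" are falsy
def pyTruthyOptStr (o : Option String) : Bool :=
  match o with
  | none => false
  | some s => decide (s ≠ "")

-- A's candidate loop over the precomputed lowered dict ('if match:' = match is some nonempty string)
def resolveLoopA (lowered : PySem.Dict String String) : List String → Option String
  | [] => none
  | cand :: rest =>
    match lowered.get? (PySem.Str.lower cand) with
    | some m => if m ≠ "" then some m else resolveLoopA lowered rest
    | none => resolveLoopA lowered rest

def resolve_column_py (columns : List String) (explicit : Option String) (candidates : List String) (fallback : Option String) : String :=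
  if pyTruthyOptStr explicit then
    let e := explicit.getD ""
    if columns.contains e then e else ""   -- raise ValueError: excluded by Pre_
  else
    let lowered := columns.foldl (fun d col => d.insert (PySem.Str.lower col) col) PySem.Dict.empty
    match resolveLoopA lowered candidates with
    | some m => m
    | none =>
      match fallback with
      | some f => f
      | none => ""   -- raise ValueError: excluded by Pre_

-- ===== PORT B =====
-- B's first loop: rank[candidate.lower()] = index of the first candidate with that lowercase
def rankAux (d : PySem.Dict String Nat) (i : Nat) : List String → PySem.Dict String Nat
  | [] => d
  | c :: rest =>
    if d.contains (PySem.Str.lower c) then rankAux d (i + 1) rest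
    else rankAux (d.insert (PySem.Str.lower c) i) (i + 1) rest

-- B's second loop body: keep the column with the strictly smallest rank seen so far
def bestStep (rank : PySem.Dict String Nat) (n : Nat) (st : Option String × Nat) (col : String) : Option String × Nat :=
  let r := rank.getD (PySem.Str.lower col) n
  if r < st.2 then (some col, r) else st

def resolve_column_py_alt (columns : List String) (explicit : Option String) (candidates : List String) (fallback : Option String) : String :=
  if pyTruthyOptStr explicit then
    let e := explicit.getD ""
    if columns.contains e then e else ""   -- raise ValueError: excluded by Pre_
  else
    let n := candidates.length
    let rank := rankAux PySem.Dict.empty 0 candidates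
    match (columns.foldl (bestStep rank n) (none, n)).1 with
    | some c => c
    | none =>
      match fallback with
      | some f => f
      | none => ""   -- raise ValueError: excluded by Pre_

-- ===== PRECONDITION & SPEC =====
-- Pre_ excludes the inputs where Python A raises ValueError, and additionally (when explicit is
-- falsy) inputs where two DISTINCT column names collide case-insensitively on a candidate name, or where an
-- empty column name can match an empty candidate: there A's dict-overwrite order and its
-- 'if match:' truthiness skip are accidental corner behaviour.
def Pre_resolve_column_py (columns : List String) (explicit : Option String) (candidates : List String) (fallback : Option String) : Prop :=
  if pyTruthyOptStr explicit then
    explicit.getD "" ∈ columns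
  else
    (¬ ("" ∈ columns ∧ "" ∈ candidates) ∧
     ((columns.filter (fun col => (candidates.map PySem.Str.lower).contains (PySem.Str.lower col))).dedup.map PySem.Str.lower).Nodup) ∧
    ((candidates.any (fun cand => columns.any (fun col => PySem.Str.lower col == PySem.Str.lower cand))) = true ∨ fallback ≠ none)

instance (columns : List String) (explicit : Option String) (candidates : List String) (fallback : Option String) : Decidable (Pre_resolve_column_py columns explicit candidates fallback) := by unfold Pre_resolve_column_py; infer_instance

def pvWitness_resolve_column_py : List String × Option String × List String × Option String :=
  (["Name", "Email"], none, ["email"], none)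

def Spec_resolve_column_py (columns : List String) (explicit : Option String) (candidates : List String) (fallback : Option String) (out : String) : Prop := out = resolve_column_py_alt columns explicit candidates fallback
instance (columns : List String) (explicit : Option String) (candidates : List String) (fallback : Option String) (out : String) : Decidable (Spec_resolve_column_py columns explicit candidates fallback out) := by unfold Spec_resolve_column_py; infer_instance

-- ===== CLAIM (what is proved, stated in full; the proofs are below) =====
def Claim_equal_resolve_column_py : Prop := ∀ (columns : List String) (explicit : Option String) (candidates : List String) (fallback : Option String), Dom_resolve_column_py columns explicit candidates fallback → Pre_resolve_column_py columns explicit candidates fallback → Spec_resolve_column_py columns explicit candidates fallback (resolve_column_py columns explicit candidates fallback)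

-- ===== LEMMAS AND PROOFS =====

-- the fold-built lowered dict looks up to the LAST column whose lower equals the key
theorem foldDict_get (cols : List String) (d : PySem.Dict String String) (k : String) :
    (cols.foldl (fun d col => d.insert (PySem.Str.lower col) col) d).get? k
      = Option.or (cols.reverse.find? (fun c => PySem.Str.lower c == k)) (d.get? k) := by
  induction cols generalizing d with
  | nil => simp
  | cons c cs ih =>
    simp only [List.foldl_cons, List.reverse_cons, List.find?_append, ih]
    rw [PySem.Dict.get?_insert]
    cases hf : cs.reverse.find? (fun c => PySem.Str.lower c == k) with
    | some m => simp [Option.or]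
    | none =>
      simp only [Option.or, List.find?_cons]
      by_cases hk : k = PySem.Str.lower c
      · simp [hk]
      · have : (PySem.Str.lower c == k) = false := by simp [Ne.symm hk]
        simp [this, hk]

-- A's loop, rephrased without the dict (needs no empty column: the 'if m ≠ ""' always holds)
def firstMatch (columns : List String) : List String → Option String
  | [] => none
  | cand :: rest =>
    match columns.reverse.find? (fun c => PySem.Str.lower c == PySem.Str.lower cand) with
    | some m => some m
    | none => firstMatch columns rest

theorem loopA_eq_firstMatch (columns : List String)
    (cands : List String)
    (hne : ∀ cand ∈ cands, ∀ m ∈ columns, PySem.Str.lower m = PySem.Str.lower cand → m ≠ "") :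
    resolveLoopA (columns.foldl (fun d col => d.insert (PySem.Str.lower col) col) PySem.Dict.empty) cands
      = firstMatch columns cands := by
  induction cands with
  | nil => rfl
  | cons cand rest ih =>
    simp only [resolveLoopA, firstMatch, foldDict_get, PySem.Dict.get?_empty, Option.or_none]
    cases hf : columns.reverse.find? (fun c => PySem.Str.lower c == PySem.Str.lower cand) with
    | none =>
      simpa using ih (fun c hc m hm hl => hne c (List.mem_cons_of_mem _ hc) m hm hl)
    | some m =>
      have hm : m ∈ columns := List.mem_reverse.mp (List.mem_of_find?_eq_some hf)
      have hlow : PySem.Str.lower m = PySem.Str.lower cand := by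
        have := List.find?_some hf; simpa using this
      have : m ≠ "" := hne cand (by simp) m hm hlow
      simp [this]

-- B's rank dict computes the index of the first candidate with a given lowercase
theorem rankAux_get (cands : List String) (d : PySem.Dict String Nat) (i : Nat) (k : String) :
    (rankAux d i cands).get? k
      = Option.or (d.get? k) ((cands.findIdx? (fun c => PySem.Str.lower c == k)).map (· + i)) := by
  induction cands generalizing d i with
  | nil => simp [rankAux]
  | cons c cs ih =>
    simp only [rankAux, List.findIdx?_cons]
    by_cases hk : PySem.Str.lower c = k
    · have hb : (PySem.Str.lower c == k) = true := by simp [hk]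
      by_cases hc : d.contains (PySem.Str.lower c) = true
      · obtain ⟨v, hv⟩ : ∃ v, d.get? k = some v := by
          rw [← hk]
          rcases ho : d.get? (PySem.Str.lower c) with _ | v
          · rw [(PySem.Dict.get?_eq_none_iff_contains d _).mp ho] at hc; simp at hc
          · exact ⟨v, rfl⟩
        simp [hc, ih, hv, hb, Option.or]
      · have hc' : d.contains (PySem.Str.lower c) = false := by simpa using hc
        have hd : d.get? k = none := by
          rw [← hk]; exact (PySem.Dict.get?_eq_none_iff_contains d _).mpr hc'
        have hd' : (d.insert (PySem.Str.lower c) i).get? k = some i := by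
          rw [PySem.Dict.get?_insert]; simp [hk]
        simp [hc', ih, hd, hd', hb, Option.or]
    · have hb : (PySem.Str.lower c == k) = false := by simp [hk]
      have hmap : ∀ (o : Option Nat), (o.map (· + 1)).map (· + i) = o.map (· + (i + 1)) := by
        intro o; cases o <;> simp <;> omega
      by_cases hc : d.contains (PySem.Str.lower c) = true
      · simp [hc, ih, hb, hmap]
      · have hc' : d.contains (PySem.Str.lower c) = false := by simpa using hc
        have : (d.insert (PySem.Str.lower c) i).get? k = d.get? k := by
          rw [PySem.Dict.get?_insert]; simp [Ne.symm hk]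
        simp [hc', ih, hb, hmap, this]

-- a nonempty list has a first g-minimal element
theorem exists_min_image {α : Type} (g : α → Nat) (l : List α) (h : l ≠ []) :
    ∃ x ∈ l, ∀ y ∈ l, g x ≤ g y := by
  induction l with
  | nil => exact absurd rfl h
  | cons c cs ih =>
    rcases eq_or_ne cs [] with hcs | hcs
    · exact ⟨c, by simp [hcs]⟩
    · obtain ⟨x, hx, hmin⟩ := ih hcs
      by_cases hcx : g c ≤ g x
      · refine ⟨c, by simp, ?_⟩
        intro y hy
        rcases List.mem_cons.mp hy with h' | h'
        · simp [h']
        · exact le_trans hcx (hmin y h')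
      · refine ⟨x, List.mem_cons_of_mem _ hx, ?_⟩
        intro y hy
        rcases List.mem_cons.mp hy with h' | h'
        · subst h'; omega
        · exact hmin y h'

theorem find?_congr_mem {α : Type} (l : List α) (p q : α → Bool) (h : ∀ x ∈ l, p x = q x) :
    l.find? p = l.find? q := by
  induction l with
  | nil => rfl
  | cons c cs ih =>
    simp only [List.find?_cons, h c (by simp)]
    cases q c
    · exact ih (fun x hx => h x (List.mem_cons_of_mem _ hx))
    · rfl

theorem find?_eq_some_of_unique {α : Type} (l : List α) (p : α → Bool) (m : α)
    (hm : m ∈ l) (hp : p m = true) (huniq : ∀ x ∈ l, p x = true → x = m) :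
    l.find? p = some m := by
  induction l with
  | nil => simp at hm
  | cons c cs ih =>
    rcases List.mem_cons.mp hm with h | h
    · subst h; simp [hp]
    · by_cases hc : p c = true
      · have := huniq c (by simp) hc; subst this; simp [hp]
      · have hc' : p c = false := by simpa using hc
        simp only [List.find?_cons, hc']
        exact ih h (fun x hx hpx => huniq x (List.mem_cons_of_mem _ hx) hpx)

-- characterisation of B's strict-< minimum fold: it returns the first element that is a
-- global g-minimum below the initial threshold, else leaves the state untouched
theorem fold_char {α : Type} (g : α → Nat) (l : List α) (b : Option α) (r : Nat) :
    l.foldl (fun st col => if g col < st.2 then (some col, g col) else st) (b, r)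
      = match l.find? (fun c => decide (g c < r ∧ ∀ c' ∈ l, g c ≤ g c')) with
        | some c => (some c, g c)
        | none => (b, r) := by
  induction l generalizing b r with
  | nil => rfl
  | cons c cs ih =>
    rw [List.foldl_cons, List.find?_cons]
    by_cases hc : g c < r
    · rw [show (if g c < (b, r).2 then (some c, g c) else (b, r)) = (some c, g c) by
        simp [hc]]
      by_cases hmin : ∀ c' ∈ cs, g c ≤ g c'
      · have hpc : decide (g c < r ∧ ∀ c' ∈ c :: cs, g c ≤ g c') = true := by
          simp only [decide_eq_true_eq]
          refine ⟨hc, ?_⟩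
          intro c' hc'
          rcases List.mem_cons.mp hc' with h | h
          · simp [h]
          · exact hmin c' h
        have hnone : cs.find? (fun x => decide (g x < g c ∧ ∀ c' ∈ cs, g x ≤ g c')) = none := by
          apply List.find?_eq_none.mpr
          intro x hx
          simp only [decide_eq_true_eq, not_and]
          intro hlt _
          exact absurd (hmin x hx) (by omega)
        rw [ih, hnone, hpc]
      · push Not at hmin
        obtain ⟨c0, hc0, hc0lt⟩ := hmin
        have hpc : decide (g c < r ∧ ∀ c' ∈ c :: cs, g c ≤ g c') = false := by
          simp only [decide_eq_false_iff_not, not_and]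
          intro _ hall
          exact absurd (hall c0 (List.mem_cons_of_mem _ hc0)) (by omega)
        have hcongr : ∀ x ∈ cs,
            (decide (g x < g c ∧ ∀ c' ∈ cs, g x ≤ g c'))
              = (decide (g x < r ∧ ∀ c' ∈ c :: cs, g x ≤ g c')) := by
          intro x hx
          rw [decide_eq_decide]
          constructor
          · rintro ⟨hlt, hall⟩
            refine ⟨by omega, ?_⟩
            intro c' hc'
            rcases List.mem_cons.mp hc' with h | h
            · subst h; omega
            · exact hall c' h
          · rintro ⟨hlt, hall⟩
            have h1 : g x ≤ g c0 := hall c0 (List.mem_cons_of_mem _ hc0)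
            exact ⟨by omega, fun c' hc' => hall c' (List.mem_cons_of_mem _ hc')⟩
        have hsome : ∃ x, cs.find? (fun x => decide (g x < g c ∧ ∀ c' ∈ cs, g x ≤ g c')) = some x := by
          obtain ⟨x, hx, hxmin⟩ := exists_min_image g cs (by intro h; subst h; simp at hc0)
          have hpx : (decide (g x < g c ∧ ∀ c' ∈ cs, g x ≤ g c')) = true := by
            simp only [decide_eq_true_eq]
            exact ⟨by have := hxmin c0 hc0; omega, hxmin⟩
          rcases hfind : cs.find? (fun x => decide (g x < g c ∧ ∀ c' ∈ cs, g x ≤ g c')) with _ | y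
          · rw [List.find?_eq_none] at hfind
            exact absurd hpx (by simp [hfind x hx])
          · exact ⟨y, rfl⟩
        obtain ⟨x, hx⟩ := hsome
        rw [ih, hx, hpc, ← find?_congr_mem _ _ _ hcongr, hx]
    · rw [show (if g c < (b, r).2 then (some c, g c) else (b, r)) = (b, r) by simp [hc]]
      have hpc : decide (g c < r ∧ ∀ c' ∈ c :: cs, g c ≤ g c') = false := by
        simp only [decide_eq_false_iff_not, not_and]
        intro h
        omega
      have hcongr : ∀ x ∈ cs,
          (decide (g x < r ∧ ∀ c' ∈ cs, g x ≤ g c'))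
            = (decide (g x < r ∧ ∀ c' ∈ c :: cs, g x ≤ g c')) := by
        intro x hx
        rw [decide_eq_decide]
        constructor
        · rintro ⟨h1, hall⟩
          refine ⟨h1, ?_⟩
          intro c' hc'
          rcases List.mem_cons.mp hc' with h | h
          · subst h; omega
          · exact hall c' h
        · rintro ⟨h1, hall⟩
          exact ⟨h1, fun c' hc' => hall c' (List.mem_cons_of_mem _ hc')⟩
      rw [ih, hpc, ← find?_congr_mem _ _ _ hcongr]

-- the per-column rank function B's scan uses
def gfun (cands : List String) (n : Nat) (col : String) : Nat :=
  (cands.findIdx? (fun c => PySem.Str.lower c == PySem.Str.lower col)).getD n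

theorem bestStep_eq (rank : PySem.Dict String Nat) (n : Nat) (g : String → Nat)
    (hg : ∀ col, rank.getD (PySem.Str.lower col) n = g col) :
    bestStep rank n = fun st col => if g col < st.2 then (some col, g col) else st := by
  funext st col
  simp [bestStep, hg col]

theorem rank_getD (cands : List String) (col : String) :
    (rankAux PySem.Dict.empty 0 cands).getD (PySem.Str.lower col) cands.length
      = gfun cands cands.length col := by
  rw [PySem.Dict.getD_eq_get?_getD, rankAux_get, PySem.Dict.get?_empty]
  simp only [Option.or, gfun]
  cases cands.findIdx? (fun c => PySem.Str.lower c == PySem.Str.lower col) <;> simp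

-- the bridge: the first g-minimal column below the threshold IS the column matched by the
-- first matching candidate (unique by hypothesis: no case-insensitive column collision on a
-- candidate name)
theorem bridge (columns : List String) (cands : List String)
    (huniq : ∀ cand ∈ cands, ∀ x ∈ columns, ∀ y ∈ columns,
        PySem.Str.lower x = PySem.Str.lower cand → PySem.Str.lower y = PySem.Str.lower cand → x = y) :
    columns.find? (fun c => decide (gfun cands cands.length c < cands.length ∧
        ∀ c' ∈ columns, gfun cands cands.length c ≤ gfun cands cands.length c'))
      = firstMatch columns cands := by
  induction cands with
  | nil =>
    simp only [firstMatch]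
    apply List.find?_eq_none.mpr
    intro x _
    simp [gfun]
  | cons cand rest ih =>
    simp only [firstMatch]
    cases hf : columns.reverse.find? (fun c => PySem.Str.lower c == PySem.Str.lower cand) with
    | some m =>
      have hm : m ∈ columns := List.mem_reverse.mp (List.mem_of_find?_eq_some hf)
      have hlow : PySem.Str.lower m = PySem.Str.lower cand := by
        have := List.find?_some hf; simpa using this
      have hgm : gfun (cand :: rest) (cand :: rest).length m = 0 := by
        simp [gfun, List.findIdx?_cons, hlow]
      apply find?_eq_some_of_unique
      · exact hm
      · simp only [decide_eq_true_eq, hgm]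
        exact ⟨by simp, fun c' _ => Nat.zero_le _⟩
      · intro x hx hpx
        simp only [decide_eq_true_eq] at hpx
        have hx0 : gfun (cand :: rest) (cand :: rest).length x = 0 := by
          have := hpx.2 m hm
          omega
        have hxlow : PySem.Str.lower cand = PySem.Str.lower x := by
          simp only [gfun, List.findIdx?_cons] at hx0
          by_cases hb : (PySem.Str.lower cand == PySem.Str.lower x) = true
          · simpa using hb
          · rw [Bool.not_eq_true] at hb
            rw [hb] at hx0
            rcases hfi : (rest.findIdx? (fun c => PySem.Str.lower c == PySem.Str.lower x)) with _ | j
            · rw [hfi] at hx0; simp at hx0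
            · rw [hfi] at hx0; simp at hx0
        exact huniq cand (by simp) x hx m hm hxlow.symm hlow
    | none =>
      have hno : ∀ c ∈ columns, (PySem.Str.lower cand == PySem.Str.lower c) = false := by
        intro c hc
        have h0 := List.find?_eq_none.mp hf c (List.mem_reverse.mpr hc)
        simp only [beq_iff_eq] at h0
        rw [beq_eq_false_iff_ne]
        exact fun h => h0 h.symm
      have hshift : ∀ c ∈ columns,
          gfun (cand :: rest) (cand :: rest).length c = gfun rest rest.length c + 1 := by
        intro c hc
        simp only [gfun, List.findIdx?_cons, hno c hc, List.length_cons]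
        cases rest.findIdx? (fun x => PySem.Str.lower x == PySem.Str.lower c) <;> simp
      rw [← ih (fun c hc => huniq c (List.mem_cons_of_mem _ hc))]
      apply find?_congr_mem
      intro x hx
      rw [decide_eq_decide]
      constructor
      · rintro ⟨h1, h2⟩
        refine ⟨by rw [hshift x hx] at h1; simpa using h1, ?_⟩
        intro c' hc'
        have := h2 c' hc'
        rw [hshift x hx, hshift c' hc'] at this
        omega
      · rintro ⟨h1, h2⟩
        refine ⟨by rw [hshift x hx]; simp; omega, ?_⟩
        intro c' hc'
        rw [hshift x hx, hshift c' hc']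
        exact Nat.add_le_add_right (h2 c' hc') 1

-- ===== VERDICT (by name: the statement is the Claim_ definition above) =====
theorem lower_eq_empty_iff (s : String) : PySem.Str.lower s = "" ↔ s = "" := by
  rw [← String.toList_inj, ← String.toList_inj, PySem.Str.toList_lower]
  simp [PySem.Chars.lower]

theorem resolve_column_py_spec : Claim_equal_resolve_column_py := by
  intro columns explicit candidates fallback _hD hP
  unfold Spec_resolve_column_py resolve_column_py resolve_column_py_alt
  unfold Pre_resolve_column_py at hP
  by_cases h : pyTruthyOptStr explicit = true
  · simp [h]
  · simp only [Bool.not_eq_true] at h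
    simp only [h, Bool.false_eq_true, if_false] at hP ⊢
    obtain ⟨⟨hem, hnd⟩, -⟩ := hP
    have hne : ∀ cand ∈ candidates, ∀ m ∈ columns,
        PySem.Str.lower m = PySem.Str.lower cand → m ≠ "" := by
      intro cand hc m hm hl he
      subst he
      have h0 : PySem.Str.lower cand = "" := by
        rw [← hl]
        rfl
      exact hem ⟨hm, (lower_eq_empty_iff cand).mp h0 ▸ hc⟩
    have huniq : ∀ cand ∈ candidates, ∀ x ∈ columns, ∀ y ∈ columns,
        PySem.Str.lower x = PySem.Str.lower cand → PySem.Str.lower y = PySem.Str.lower cand → x = y := by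
      intro cand hc x hx y hy hlx hly
      have hmem : ∀ z ∈ columns, PySem.Str.lower z = PySem.Str.lower cand →
          z ∈ (columns.filter (fun col => (candidates.map PySem.Str.lower).contains (PySem.Str.lower col))).dedup := by
        intro z hz hlz
        refine List.mem_dedup.mpr (List.mem_filter.mpr ⟨hz, ?_⟩)
        have : PySem.Str.lower z ∈ candidates.map PySem.Str.lower := by
          rw [hlz]
          exact List.mem_map_of_mem hc
        simpa using this
      exact List.inj_on_of_nodup_map hnd (hmem x hx hlx) (hmem y hy hly) (by rw [hlx, hly])
    rw [loopA_eq_firstMatch columns candidates hne]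
    rw [bestStep_eq (rankAux PySem.Dict.empty 0 candidates) candidates.length
          (gfun candidates candidates.length) (fun col => rank_getD candidates col)]
    rw [fold_char]
    rw [bridge columns candidates huniq]
    cases firstMatch columns candidates <;> rfl
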